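-- pv_equiv track=rewrite | github.com/MinecraftSchematicServices/api | schematicGenerator/utils.py | bresenham_line_3d
-- ===== SOURCE A (Python) =====
-- def bresenham_line_3d(start: tuple, end: tuple) -> list:
--     points = []
--     x0, y0, z0 = start
--     x1, y1, z1 = end
--
--     dx = abs(x1 - x0)
--     dy = abs(y1 - y0)
--     dz = abs(z1 - z0)
--
--     sx = 1 if x0 < x1 else -1
--     sy = 1 if y0 < y1 else -1
--     sz = 1 if z0 < z1 else -1
--
--     if dx >= dy and dx >= dz:
--         err1 = 2 * dy - dx
--         err2 = 2 * dz - dx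
--         while x0 != x1:
--             points.append((x0, y0, z0))
--             if err1 > 0:
--                 y0 += sy
--                 err1 -= 2 * dx
--             if err2 > 0:
--                 z0 += sz
--                 err2 -= 2 * dx
--             err1 += 2 * dy
--             err2 += 2 * dz
--             x0 += sx
--
--     elif dy >= dx and dy >= dz:
--         err1 = 2 * dx - dy
--         err2 = 2 * dz - dy
--         while y0 != y1:
--             points.append((x0, y0, z0))
--             if err1 > 0:
--                 x0 += sx
--                 err1 -= 2 * dy
--             if err2 > 0:
--                 z0 += sz
--                 err2 -= 2 * dy
--             err1 += 2 * dx
--             err2 += 2 * dz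
--             y0 += sy
--
--     else:
--         err1 = 2 * dy - dz
--         err2 = 2 * dx - dz
--         while z0 != z1:
--             points.append((x0, y0, z0))
--             if err1 > 0:
--                 y0 += sy
--                 err1 -= 2 * dz
--             if err2 > 0:
--                 x0 += sx
--                 err2 -= 2 * dz
--             err1 += 2 * dy
--             err2 += 2 * dx
--             z0 += sz
--
--     points.append((x0, y0, z0))
--
--     return points
-- ===== SOURCE B (Python) =====
-- def bresenham_line_3d(start: tuple, end: tuple) -> list:
--     x0, y0, z0 = start
--     x1, y1, z1 = end
--     dx = abs(x1 - x0)
--     dy = abs(y1 - y0)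
--     dz = abs(z1 - z0)
--     n = max(dx, dy, dz)
--     if n == 0:
--         return [(x0, y0, z0)]
--     sx = 1 if x0 < x1 else -1
--     sy = 1 if y0 < y1 else -1
--     sz = 1 if z0 < z1 else -1
--     return [
--         (
--             x0 + sx * ((2 * i * dx + n - 1) // (2 * n)),
--             y0 + sy * ((2 * i * dy + n - 1) // (2 * n)),
--             z0 + sz * ((2 * i * dz + n - 1) // (2 * n)),
--         )
--         for i in range(n + 1)
--     ]
-- ===== Notes on version B (the rewrite author's own statement) =====
-- stated objective: alternative
-- what changed: Replaces the three-way dominant-axis error-accumulator state machine with a stateless closed-form interpolation: n = max(dx,dy,dz) and each coordinate of point i is start + sign*((2*i*d + n - 1)//(2*n)), reproducing Bresenham's exact tie-breaking without any incremental error terms.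
import Mathlib
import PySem

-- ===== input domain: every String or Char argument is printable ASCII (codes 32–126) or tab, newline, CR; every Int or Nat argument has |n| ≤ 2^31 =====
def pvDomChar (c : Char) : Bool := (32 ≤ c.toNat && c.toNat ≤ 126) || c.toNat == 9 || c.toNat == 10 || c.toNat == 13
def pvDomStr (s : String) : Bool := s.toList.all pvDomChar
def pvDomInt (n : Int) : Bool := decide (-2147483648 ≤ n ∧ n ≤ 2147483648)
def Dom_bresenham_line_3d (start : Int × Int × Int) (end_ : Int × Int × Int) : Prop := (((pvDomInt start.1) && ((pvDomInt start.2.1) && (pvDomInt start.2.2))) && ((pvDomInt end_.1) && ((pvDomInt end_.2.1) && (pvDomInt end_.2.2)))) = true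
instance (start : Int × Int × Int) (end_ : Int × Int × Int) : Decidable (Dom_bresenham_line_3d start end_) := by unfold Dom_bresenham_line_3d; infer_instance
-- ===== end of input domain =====

-- B replaces A's three incremental error-accumulator loops by a stateless closed-form
-- integer interpolation per step (same output, same O(n) cost): objective "alternative".

-- ===== PORT A =====
-- A's while loops, one per dominant axis, transliterated with fuel = |target - major|
-- (the loop advances the major coordinate by ±1 toward the target each iteration, so the
-- fuel is exactly the number of iterations); each loop also performs the final append.
def pvLoopX : Nat → Int → Int → Int → Int → Int → Int → Int → Int → Int → Int → Int → Int → List (Int × Int × Int)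
  | 0, x0, y0, z0, _, _, _, _, _, _, _, _, _ => [(x0, y0, z0)]
  | fuel+1, x0, y0, z0, x1, sx, sy, sz, dx, dy, dz, err1, err2 =>
    if x0 = x1 then [(x0, y0, z0)]
    else
      (x0, y0, z0) ::
        pvLoopX fuel (x0 + sx)
          (if err1 > 0 then y0 + sy else y0)
          (if err2 > 0 then z0 + sz else z0)
          x1 sx sy sz dx dy dz
          ((if err1 > 0 then err1 - 2*dx else err1) + 2*dy)
          ((if err2 > 0 then err2 - 2*dx else err2) + 2*dz)

def pvLoopY : Nat → Int → Int → Int → Int → Int → Int → Int → Int → Int → Int → Int → Int → List (Int × Int × Int)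
  | 0, x0, y0, z0, _, _, _, _, _, _, _, _, _ => [(x0, y0, z0)]
  | fuel+1, x0, y0, z0, y1, sx, sy, sz, dx, dy, dz, err1, err2 =>
    if y0 = y1 then [(x0, y0, z0)]
    else
      (x0, y0, z0) ::
        pvLoopY fuel
          (if err1 > 0 then x0 + sx else x0)
          (y0 + sy)
          (if err2 > 0 then z0 + sz else z0)
          y1 sx sy sz dx dy dz
          ((if err1 > 0 then err1 - 2*dy else err1) + 2*dx)
          ((if err2 > 0 then err2 - 2*dy else err2) + 2*dz)

def pvLoopZ : Nat → Int → Int → Int → Int → Int → Int → Int → Int → Int → Int → Int → Int → List (Int × Int × Int)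
  | 0, x0, y0, z0, _, _, _, _, _, _, _, _, _ => [(x0, y0, z0)]
  | fuel+1, x0, y0, z0, z1, sx, sy, sz, dx, dy, dz, err1, err2 =>
    if z0 = z1 then [(x0, y0, z0)]
    else
      (x0, y0, z0) ::
        pvLoopZ fuel
          (if err2 > 0 then x0 + sx else x0)
          (if err1 > 0 then y0 + sy else y0)
          (z0 + sz)
          z1 sx sy sz dx dy dz
          ((if err1 > 0 then err1 - 2*dz else err1) + 2*dy)
          ((if err2 > 0 then err2 - 2*dz else err2) + 2*dx)

def bresenham_line_3d (start : Int × Int × Int) (end_ : Int × Int × Int) : List (Int × Int × Int) :=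
  match start, end_ with
  | (x0, y0, z0), (x1, y1, z1) =>
    let dx := |x1 - x0|
    let dy := |y1 - y0|
    let dz := |z1 - z0|
    let sx : Int := if x0 < x1 then 1 else -1
    let sy : Int := if y0 < y1 then 1 else -1
    let sz : Int := if z0 < z1 then 1 else -1
    if dy ≤ dx ∧ dz ≤ dx then
      pvLoopX dx.toNat x0 y0 z0 x1 sx sy sz dx dy dz (2*dy - dx) (2*dz - dx)
    else if dx ≤ dy ∧ dz ≤ dy then
      pvLoopY dy.toNat x0 y0 z0 y1 sx sy sz dx dy dz (2*dx - dy) (2*dz - dy)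
    else
      pvLoopZ dz.toNat x0 y0 z0 z1 sx sy sz dx dy dz (2*dy - dz) (2*dx - dz)

-- ===== PORT B =====
-- (2*i*d + n - 1) // (2*n), the closed-form minor-axis offset of Source B
def pvOff (n d i : Int) : Int := PySem.Int.floordiv (2*i*d + n - 1) (2*n)

def bresenham_line_3d_alt (start : Int × Int × Int) (end_ : Int × Int × Int) : List (Int × Int × Int) :=
  match start, end_ with
  | (x0, y0, z0), (x1, y1, z1) =>
    let dx := |x1 - x0|
    let dy := |y1 - y0|
    let dz := |z1 - z0|
    let n := max dx (max dy dz)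
    if n = 0 then [(x0, y0, z0)]
    else
      let sx : Int := if x0 < x1 then 1 else -1
      let sy : Int := if y0 < y1 then 1 else -1
      let sz : Int := if z0 < z1 then 1 else -1
      (PySem.List.pyRange 0 (n+1) 1).map (fun i =>
        (x0 + sx * pvOff n dx i, y0 + sy * pvOff n dy i, z0 + sz * pvOff n dz i))

-- ===== PRECONDITION & SPEC =====
def Spec_bresenham_line_3d (start : Int × Int × Int) (end_ : Int × Int × Int) (out : List (Int × Int × Int)) : Prop := out = bresenham_line_3d_alt start end_
instance (start : Int × Int × Int) (end_ : Int × Int × Int) (out : List (Int × Int × Int)) : Decidable (Spec_bresenham_line_3d start end_ out) := by unfold Spec_bresenham_line_3d; infer_instance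

-- ===== CLAIM (what is proved, stated in full; the proofs are below) =====
def Claim_equal_bresenham_line_3d : Prop := ∀ (start : Int × Int × Int) (end_ : Int × Int × Int), Dom_bresenham_line_3d start end_ → Spec_bresenham_line_3d start end_ (bresenham_line_3d start end_)

-- ===== LEMMAS AND PROOFS =====

-- generic version of A's loop: major axis `maj` steps by smaj toward `tgt`,
-- minor axes b (err1, delta d1) and c (err2, delta d2); `emit` reassembles the tuple.
def pvGLoop (emit : Int → Int → Int → (Int × Int × Int)) : Nat → Int → Int → Int → Int → Int → Int → Int → Int → Int → Int → Int → Int → List (Int × Int × Int)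
  | 0, maj, b, c, _, _, _, _, _, _, _, _, _ => [emit maj b c]
  | fuel+1, maj, b, c, tgt, smaj, s1, s2, n, d1, d2, e1, e2 =>
    if maj = tgt then [emit maj b c]
    else
      emit maj b c ::
        pvGLoop emit fuel (maj + smaj)
          (if e1 > 0 then b + s1 else b)
          (if e2 > 0 then c + s2 else c)
          tgt smaj s1 s2 n d1 d2
          ((if e1 > 0 then e1 - 2*n else e1) + 2*d1)
          ((if e2 > 0 then e2 - 2*n else e2) + 2*d2)

lemma pvLoopX_eq_g : ∀ (fuel : Nat) (x0 y0 z0 x1 sx sy sz dx dy dz e1 e2 : Int),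
    pvLoopX fuel x0 y0 z0 x1 sx sy sz dx dy dz e1 e2
      = pvGLoop (fun a b c => (a, b, c)) fuel x0 y0 z0 x1 sx sy sz dx dy dz e1 e2 := by
  intro fuel
  induction fuel with
  | zero => intros; rfl
  | succ m ih => intros; simp only [pvLoopX, pvGLoop, ih]

lemma pvLoopY_eq_g : ∀ (fuel : Nat) (x0 y0 z0 y1 sx sy sz dx dy dz e1 e2 : Int),
    pvLoopY fuel x0 y0 z0 y1 sx sy sz dx dy dz e1 e2
      = pvGLoop (fun a b c => (b, a, c)) fuel y0 x0 z0 y1 sy sx sz dy dx dz e1 e2 := by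
  intro fuel
  induction fuel with
  | zero => intros; rfl
  | succ m ih => intros; simp only [pvLoopY, pvGLoop, ih]

lemma pvLoopZ_eq_g : ∀ (fuel : Nat) (x0 y0 z0 z1 sx sy sz dx dy dz e1 e2 : Int),
    pvLoopZ fuel x0 y0 z0 z1 sx sy sz dx dy dz e1 e2
      = pvGLoop (fun a b c => (c, b, a)) fuel z0 y0 x0 z1 sz sy sx dz dy dx e1 e2 := by
  intro fuel
  induction fuel with
  | zero => intros; rfl
  | succ m ih => intros; simp only [pvLoopZ, pvGLoop, ih]

lemma pvEdivEq (a b q : Int) (hb : 0 < b) (h1 : b*q ≤ a) (h2 : a < b*(q+1)) : a / b = q := by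
  have hmod := Int.mul_ediv_add_emod a b
  have hm0 := Int.emod_nonneg a (ne_of_gt hb)
  have hm1 := Int.emod_lt_of_pos a hb
  have hlt : a / b < q + 1 := by
    have : b * (a / b) < b * (q + 1) := by linarith
    exact lt_of_mul_lt_mul_left this (le_of_lt hb)
  have hgt : q < a / b + 1 := by
    have : b * q < b * (a / b + 1) := by linarith
    exact lt_of_mul_lt_mul_left this (le_of_lt hb)
  omega

lemma pvOff_ediv (n d i : Int) (hn : 1 ≤ n) : pvOff n d i = (2*i*d + n - 1) / (2*n) := by
  unfold pvOff
  exact PySem.Int.floordiv_eq_ediv_of_pos (by omega)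

lemma pvOff_bounds (n d i : Int) (hn : 1 ≤ n) :
    2*n*(pvOff n d i) ≤ 2*i*d + n - 1 ∧ 2*i*d + n - 1 < 2*n*(pvOff n d i) + 2*n := by
  rw [pvOff_ediv n d i hn]
  have hb : (0:Int) < 2*n := by omega
  have hmod := Int.mul_ediv_add_emod (2*i*d + n - 1) (2*n)
  have hm0 := Int.emod_nonneg (2*i*d + n - 1) (ne_of_gt hb)
  have hm1 := Int.emod_lt_of_pos (2*i*d + n - 1) hb
  constructor <;> linarith

lemma pvOff_zero (n d : Int) (hn : 1 ≤ n) : pvOff n d 0 = 0 := by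
  rw [pvOff_ediv n d 0 hn]
  exact pvEdivEq _ _ _ (by omega) (by linarith) (by linarith)

lemma pvOff_self (n i : Int) (hn : 1 ≤ n) (hi : 0 ≤ i) : pvOff n n i = i := by
  rw [pvOff_ediv n n i hn]
  refine pvEdivEq _ _ _ (by omega) ?_ ?_ <;> nlinarith

lemma pvOff_step (n d i : Int) (hn : 1 ≤ n) (hd0 : 0 ≤ d) (hdn : d ≤ n) :
    pvOff n d (i+1) = pvOff n d i + (if 2*(i+1)*d - n - 2*n*(pvOff n d i) > 0 then 1 else 0) := by
  have hb := pvOff_bounds n d i hn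
  have hexp : 2*(i+1)*d = 2*i*d + 2*d := by ring
  rw [pvOff_ediv n d (i+1) hn]
  have hexp' : 2*(i+1)*d + n - 1 = (2*i*d + n - 1) + 2*d := by ring
  split_ifs with hc
  · refine pvEdivEq _ _ _ (by omega) ?_ ?_
    · nlinarith
    · nlinarith
  · refine pvEdivEq _ _ _ (by omega) ?_ ?_
    · nlinarith
    · nlinarith

lemma pvGLoop_eq (emit : Int → Int → Int → (Int × Int × Int))
    (maj0 b0 c0 smaj s1 s2 n d1 d2 : Int)
    (hn : 1 ≤ n) (hd10 : 0 ≤ d1) (hd1n : d1 ≤ n) (hd20 : 0 ≤ d2) (hd2n : d2 ≤ n)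
    (hs : smaj = 1 ∨ smaj = -1) :
    ∀ (fuel : Nat) (i : Int), 0 ≤ i → i + fuel = n →
    pvGLoop emit fuel (maj0 + smaj*i) (b0 + s1 * pvOff n d1 i) (c0 + s2 * pvOff n d2 i)
        (maj0 + smaj*n) smaj s1 s2 n d1 d2
        (2*(i+1)*d1 - n - 2*n*(pvOff n d1 i)) (2*(i+1)*d2 - n - 2*n*(pvOff n d2 i))
      = (PySem.List.pyRange i (n+1) 1).map (fun j =>
          emit (maj0 + smaj*j) (b0 + s1 * pvOff n d1 j) (c0 + s2 * pvOff n d2 j)) := by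
  intro fuel
  induction fuel with
  | zero =>
    intro i _hi0 hin
    have hieq : i = n := by push_cast at hin; omega
    subst hieq
    rw [show (i+1) = i + 1 by rfl, PySem.List.pyRange_one_cons (by omega),
      PySem.List.pyRange_one_eq_nil (by omega)]
    rfl
  | succ m ih =>
    intro i hi0 hin
    push_cast at hin
    have hilt : i < n := by omega
    have hne : maj0 + smaj*i ≠ maj0 + smaj*n := by
      rcases hs with h | h <;> subst h <;> intro hcontra <;> omega
    have hF1 := pvOff_step n d1 i hn hd10 hd1n
    have hF2 := pvOff_step n d2 i hn hd20 hd2n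
    have key := ih (i+1) (by omega) (by omega)
    rw [PySem.List.pyRange_one_cons (by omega), List.map_cons]
    simp only [pvGLoop, if_neg hne]
    refine congrArg₂ _ rfl ?_
    have e_maj : maj0 + smaj*i + smaj = maj0 + smaj*(i+1) := by ring
    have e_b : (if 2*(i+1)*d1 - n - 2*n*(pvOff n d1 i) > 0 then (b0 + s1 * pvOff n d1 i) + s1 else b0 + s1 * pvOff n d1 i)
        = b0 + s1 * pvOff n d1 (i+1) := by
      rw [hF1]; split_ifs <;> ring
    have e_c : (if 2*(i+1)*d2 - n - 2*n*(pvOff n d2 i) > 0 then (c0 + s2 * pvOff n d2 i) + s2 else c0 + s2 * pvOff n d2 i)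
        = c0 + s2 * pvOff n d2 (i+1) := by
      rw [hF2]; split_ifs <;> ring
    have e_e1 : ((if 2*(i+1)*d1 - n - 2*n*(pvOff n d1 i) > 0 then (2*(i+1)*d1 - n - 2*n*(pvOff n d1 i)) - 2*n else 2*(i+1)*d1 - n - 2*n*(pvOff n d1 i)) + 2*d1)
        = 2*((i+1)+1)*d1 - n - 2*n*(pvOff n d1 (i+1)) := by
      rw [hF1]; split_ifs <;> ring
    have e_e2 : ((if 2*(i+1)*d2 - n - 2*n*(pvOff n d2 i) > 0 then (2*(i+1)*d2 - n - 2*n*(pvOff n d2 i)) - 2*n else 2*(i+1)*d2 - n - 2*n*(pvOff n d2 i)) + 2*d2)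
        = 2*((i+1)+1)*d2 - n - 2*n*(pvOff n d2 (i+1)) := by
      rw [hF2]; split_ifs <;> ring
    rw [e_maj, e_b, e_c, e_e1, e_e2]
    exact key

lemma pvSignAbs (a b : Int) : (if a < b then (1:Int) else -1) * |b - a| = b - a := by
  rcases abs_cases (b - a) with ⟨h1, h2⟩ | ⟨h1, h2⟩ <;> split_ifs with h <;> rw [h1] <;> omega

lemma pvBranchX (x0 y0 z0 x1 dx dy dz sx sy sz : Int)
    (hdx : sx * dx = x1 - x0) (hsx : sx = 1 ∨ sx = -1)
    (hdy0 : 0 ≤ dy) (hdz0 : 0 ≤ dz) (h1 : dy ≤ dx) (h2 : dz ≤ dx) (hpos : 1 ≤ dx) :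
    pvLoopX dx.toNat x0 y0 z0 x1 sx sy sz dx dy dz (2*dy - dx) (2*dz - dx)
      = (PySem.List.pyRange 0 (dx+1) 1).map (fun i =>
          (x0 + sx * pvOff dx dx i, y0 + sy * pvOff dx dy i, z0 + sz * pvOff dx dz i)) := by
  rw [pvLoopX_eq_g]
  have hmain := pvGLoop_eq (fun a b c => (a, b, c)) x0 y0 z0 sx sy sz dx dy dz hpos hdy0 h1 hdz0 h2 hsx
    dx.toNat 0 le_rfl (by omega)
  rw [pvOff_zero dx dy hpos, pvOff_zero dx dz hpos] at hmain
  norm_num at hmain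
  rw [show x0 + sx * dx = x1 by linarith [hdx]] at hmain
  rw [hmain]
  apply List.map_congr_left
  intro j hj
  rw [PySem.List.mem_pyRange_one] at hj
  rw [pvOff_self dx j hpos hj.1]

lemma pvBranchY (x0 y0 z0 y1 dx dy dz sx sy sz : Int)
    (hdy : sy * dy = y1 - y0) (hsy : sy = 1 ∨ sy = -1)
    (hdx0 : 0 ≤ dx) (hdz0 : 0 ≤ dz) (h1 : dx ≤ dy) (h2 : dz ≤ dy) (hpos : 1 ≤ dy) :
    pvLoopY dy.toNat x0 y0 z0 y1 sx sy sz dx dy dz (2*dx - dy) (2*dz - dy)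
      = (PySem.List.pyRange 0 (dy+1) 1).map (fun i =>
          (x0 + sx * pvOff dy dx i, y0 + sy * pvOff dy dy i, z0 + sz * pvOff dy dz i)) := by
  rw [pvLoopY_eq_g]
  have hmain := pvGLoop_eq (fun a b c => (b, a, c)) y0 x0 z0 sy sx sz dy dx dz hpos hdx0 h1 hdz0 h2 hsy
    dy.toNat 0 le_rfl (by omega)
  rw [pvOff_zero dy dx hpos, pvOff_zero dy dz hpos] at hmain
  norm_num at hmain
  rw [show y0 + sy * dy = y1 by linarith [hdy]] at hmain
  rw [hmain]
  apply List.map_congr_left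
  intro j hj
  rw [PySem.List.mem_pyRange_one] at hj
  rw [pvOff_self dy j hpos hj.1]

lemma pvBranchZ (x0 y0 z0 z1 dx dy dz sx sy sz : Int)
    (hdz : sz * dz = z1 - z0) (hsz : sz = 1 ∨ sz = -1)
    (hdx0 : 0 ≤ dx) (hdy0 : 0 ≤ dy) (h1 : dy ≤ dz) (h2 : dx ≤ dz) (hpos : 1 ≤ dz) :
    pvLoopZ dz.toNat x0 y0 z0 z1 sx sy sz dx dy dz (2*dy - dz) (2*dx - dz)
      = (PySem.List.pyRange 0 (dz+1) 1).map (fun i =>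
          (x0 + sx * pvOff dz dx i, y0 + sy * pvOff dz dy i, z0 + sz * pvOff dz dz i)) := by
  rw [pvLoopZ_eq_g]
  have hmain := pvGLoop_eq (fun a b c => (c, b, a)) z0 y0 x0 sz sy sx dz dy dx hpos hdy0 h1 hdx0 h2 hsz
    dz.toNat 0 le_rfl (by omega)
  rw [pvOff_zero dz dy hpos, pvOff_zero dz dx hpos] at hmain
  norm_num at hmain
  rw [show z0 + sz * dz = z1 by linarith [hdz]] at hmain
  rw [hmain]
  apply List.map_congr_left
  intro j hj
  rw [PySem.List.mem_pyRange_one] at hj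
  rw [pvOff_self dz j hpos hj.1]

-- ===== VERDICT (by name: the statement is the Claim_ definition above) =====
theorem bresenham_line_3d_spec : Claim_equal_bresenham_line_3d := by
  intro start end_ _
  unfold Spec_bresenham_line_3d
  obtain ⟨x0, y0, z0⟩ := start
  obtain ⟨x1, y1, z1⟩ := end_
  simp only [bresenham_line_3d, bresenham_line_3d_alt]
  have hsxd := pvSignAbs x0 x1
  have hsyd := pvSignAbs y0 y1
  have hszd := pvSignAbs z0 z1
  have hsx : (if x0 < x1 then (1:Int) else -1) = 1 ∨ (if x0 < x1 then (1:Int) else -1) = -1 := by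
    split_ifs <;> simp
  have hsy : (if y0 < y1 then (1:Int) else -1) = 1 ∨ (if y0 < y1 then (1:Int) else -1) = -1 := by
    split_ifs <;> simp
  have hsz : (if z0 < z1 then (1:Int) else -1) = 1 ∨ (if z0 < z1 then (1:Int) else -1) = -1 := by
    split_ifs <;> simp
  have hdx0 : 0 ≤ |x1 - x0| := abs_nonneg _
  have hdy0 : 0 ≤ |y1 - y0| := abs_nonneg _
  have hdz0 : 0 ≤ |z1 - z0| := abs_nonneg _
  generalize hSX : (if x0 < x1 then (1:Int) else -1) = sx at hsxd hsx ⊢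
  generalize hSY : (if y0 < y1 then (1:Int) else -1) = sy at hsyd hsy ⊢
  generalize hSZ : (if z0 < z1 then (1:Int) else -1) = sz at hszd hsz ⊢
  generalize hDX : |x1 - x0| = dx at hsxd hdx0 ⊢
  generalize hDY : |y1 - y0| = dy at hsyd hdy0 ⊢
  generalize hDZ : |z1 - z0| = dz at hszd hdz0 ⊢
  by_cases hx : dy ≤ dx ∧ dz ≤ dx
  · rw [if_pos hx]
    have hmax : max dx (max dy dz) = dx := max_eq_left (max_le hx.1 hx.2)
    rw [hmax]
    by_cases h0 : dx = 0
    · rw [if_pos h0, h0]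
      rfl
    · rw [if_neg h0]
      exact pvBranchX x0 y0 z0 x1 dx dy dz sx sy sz hsxd hsx hdy0 hdz0 hx.1 hx.2 (by omega)
  · rw [if_neg hx]
    by_cases hy : dx ≤ dy ∧ dz ≤ dy
    · rw [if_pos hy]
      have hmax : max dx (max dy dz) = dy := by
        rw [max_eq_left hy.2, max_eq_right hy.1]
      rw [hmax]
      have hpos : 1 ≤ dy := by omega
      rw [if_neg (by omega)]
      exact pvBranchY x0 y0 z0 y1 dx dy dz sx sy sz hsyd hsy (by omega) (by omega) hy.1 hy.2 hpos
    · rw [if_neg hy]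
      have h1 : dy ≤ dz := by omega
      have h2 : dx ≤ dz := by omega
      have hpos : 1 ≤ dz := by omega
      have hmax : max dx (max dy dz) = dz := by
        rw [max_eq_right h1, max_eq_right h2]
      rw [hmax, if_neg (by omega)]
      exact pvBranchZ x0 y0 z0 z1 dx dy dz sx sy sz hszd hsz (by omega) (by omega) h1 h2 hpos
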